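-- pv_equiv track=rewrite | github.com/AlexeyYevtushik/auto_job_finder | src/s5_get_links_to_apply_manualy.py | _slice_between_markers
-- ===== SOURCE A (Python) =====
-- from typing import Dict, Any, Iterable, List, Optional
--
-- def _slice_between_markers(lines: List[str]) -> List[str]:
--     """
--     Keep from the FIRST 'All offers'/'Wszystkie oferty' (inclusive)
--     to BEFORE the FIRST 'Apply'/'Aplikuj' after it (exclusive).
--     If start marker missing -> return the original lines.
--     If end marker missing -> keep until the end.
--     """
--     start_markers = {"all offers", "wszystkie oferty"}
--     end_markers = {"apply", "aplikuj"}
--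
--     norm = [ln.strip().lower() for ln in lines]
--     start: Optional[int] = next((i for i, ln in enumerate(norm) if ln in start_markers), None)
--     if start is None:
--         return lines
--
--     end: Optional[int] = next(
--         (j for j, ln in enumerate(norm[start + 1 :], start + 1) if ln in end_markers),
--         None,
--     )
--     return lines[start:] if end is None else lines[start:end]
-- ===== SOURCE B (Python) =====
-- from typing import List
--
-- def _slice_between_markers(lines: List[str]) -> List[str]:
--     # Single streaming pass with a state flag instead of two index scans plus slicing.
--     start_markers = {"all offers", "wszystkie oferty"}
--     end_markers = {"apply", "aplikuj"}
--     started = False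
--     acc: List[str] = []
--     for ln in lines:
--         n = ln.strip().lower()
--         if started:
--             if n in end_markers:
--                 break
--             acc.append(ln)
--         elif n in start_markers:
--             started = True
--             acc.append(ln)
--     return acc if started else lines
-- ===== Notes on version B (the rewrite author's own statement) =====
-- stated objective: alternative
-- what changed: Replaces the normalised-copy list, two next() index scans and slicing with a single streaming state-machine pass that normalises each line inline and accumulates the kept lines.
import Mathlib
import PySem

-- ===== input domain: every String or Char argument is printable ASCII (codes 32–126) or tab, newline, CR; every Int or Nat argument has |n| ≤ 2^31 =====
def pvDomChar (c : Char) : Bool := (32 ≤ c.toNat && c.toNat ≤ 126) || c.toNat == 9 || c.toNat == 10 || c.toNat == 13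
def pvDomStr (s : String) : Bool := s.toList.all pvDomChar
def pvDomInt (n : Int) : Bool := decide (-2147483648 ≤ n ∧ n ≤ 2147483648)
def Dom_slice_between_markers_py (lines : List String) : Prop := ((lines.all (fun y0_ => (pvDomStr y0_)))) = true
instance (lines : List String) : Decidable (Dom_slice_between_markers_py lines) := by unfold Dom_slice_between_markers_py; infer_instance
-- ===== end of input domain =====

-- B replaces A's normalised copy, two next() index scans and slicing by a single
-- streaming state-machine pass (alternative decomposition, same cost).

-- ===== PORT A =====
-- norm[i] in start_markers / end_markers
def aIsStart (n : String) : Bool := n == "all offers" || n == "wszystkie oferty"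
def aIsEnd (n : String) : Bool := n == "apply" || n == "aplikuj"

-- norm = [ln.strip().lower() for ln in lines]
def aNormList (lines : List String) : List String :=
  lines.map (fun ln => PySem.Str.lower (PySem.Str.strip ln))

def slice_between_markers_py (lines : List String) : List String :=
  let norm := aNormList lines
  match norm.findIdx? aIsStart with
  | none => lines
  | some start =>
    -- enumerate(norm[start+1:], start+1): the absolute end index is start+1+j
    match (PySem.List.slice norm (some ((start : Int) + 1)) none).findIdx? aIsEnd with
    | none => PySem.List.slice lines (some (start : Int)) none
    | some j => PySem.List.slice lines (some (start : Int)) (some ((start : Int) + 1 + (j : Int)))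

-- ===== PORT B =====
def altNorm (ln : String) : String := PySem.Str.lower (PySem.Str.strip ln)

def altGo : List String → Bool → List String → List String × Bool
  | [], started, acc => (acc, started)
  | ln :: rest, started, acc =>
    let n := altNorm ln
    if started then
      if aIsEnd n then (acc, started)
      else altGo rest started (acc ++ [ln])
    else if aIsStart n then altGo rest true (acc ++ [ln])
    else altGo rest started acc

def slice_between_markers_py_alt (lines : List String) : List String :=
  let r := altGo lines false []
  if r.2 then r.1 else lines

-- ===== PRECONDITION & SPEC =====
def Spec_slice_between_markers_py (lines : List String) (out : List String) : Prop := out = slice_between_markers_py_alt lines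
instance (lines : List String) (out : List String) : Decidable (Spec_slice_between_markers_py lines out) := by unfold Spec_slice_between_markers_py; infer_instance

-- ===== CLAIM (what is proved, stated in full; the proofs are below) =====
def Claim_equal_slice_between_markers_py : Prop := ∀ (lines : List String), Dom_slice_between_markers_py lines → Spec_slice_between_markers_py lines (slice_between_markers_py lines)

-- ===== LEMMAS AND PROOFS =====

-- once started, altGo collects until the first end marker (break = takeWhile of the negation)
theorem altGo_true (l : List String) : ∀ acc,
    altGo l true acc = (acc ++ l.takeWhile (fun x => !aIsEnd (altNorm x)), true) := by
  induction l with
  | nil => intro acc; simp [altGo]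
  | cons ln rest ih =>
    intro acc
    by_cases h : aIsEnd (altNorm ln) = true <;>
      simp [altGo, h, ih]

-- before a start marker, altGo just skips
theorem altGo_false_none (l : List String)
    (h : l.findIdx? (fun x => aIsStart (altNorm x)) = none) : ∀ acc,
    altGo l false acc = (acc, false) := by
  induction l with
  | nil => intro acc; simp [altGo]
  | cons ln rest ih =>
    intro acc
    rw [List.findIdx?_cons] at h
    by_cases hs : aIsStart (altNorm ln) = true
    · simp [hs] at h
    · simp [hs] at h
      simp [altGo, hs, ih (by simpa using h)]

-- takeWhile (¬p) vs findIdx? p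
theorem takeWhile_of_findIdx?_none {α : Type} (p : α → Bool) (l : List α)
    (h : l.findIdx? p = none) : l.takeWhile (fun x => !p x) = l := by
  induction l with
  | nil => rfl
  | cons a rest ih =>
    rw [List.findIdx?_cons] at h
    by_cases hp : p a = true
    · simp [hp] at h
    · simp [hp] at h
      simp [hp, ih (by simpa using h)]

theorem takeWhile_of_findIdx?_some {α : Type} (p : α → Bool) (l : List α) : ∀ j,
    l.findIdx? p = some j → l.takeWhile (fun x => !p x) = l.take j := by
  induction l with
  | nil => intro j h; simp at h
  | cons a rest ih =>
    intro j h
    rw [List.findIdx?_cons] at h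
    by_cases hp : p a = true
    · simp [hp] at h
      simp [hp, ← h]
    · simp [hp] at h
      obtain ⟨j', hj', rfl⟩ := h
      simp [hp, ih j' hj']

theorem aNormList_cons (ln : String) (rest : List String) :
    aNormList (ln :: rest) = altNorm ln :: aNormList rest := rfl

theorem findIdx?_norm (p : String → Bool) (l : List String) :
    (aNormList l).findIdx? p = l.findIdx? (fun x => p (altNorm x)) := by
  simp [aNormList, List.findIdx?_map, altNorm]; rfl

-- cast-free shapes of the three slices A takes
theorem sliceFrom {α : Type} (xs : List α) (s : Nat) :
    PySem.List.slice xs (some ((s : Int))) none = xs.drop s :=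
  PySem.List.slice_from_natCast xs s

theorem sliceFromSucc {α : Type} (xs : List α) (s : Nat) :
    PySem.List.slice xs (some ((s : Int) + 1)) none = xs.drop (s + 1) := by
  rw [show ((s : Int) + 1) = (((s + 1 : Nat)) : Int) by push_cast; ring,
    PySem.List.slice_from_natCast]

theorem sliceSeg {α : Type} (xs : List α) (s j : Nat) :
    PySem.List.slice xs (some ((s : Int))) (some ((s : Int) + 1 + (j : Int))) =
      (xs.drop s).take (1 + j) := by
  rw [show ((s : Int) + 1 + (j : Int)) = (((s + 1 + j : Nat)) : Int) by push_cast; ring,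
    PySem.List.slice_natCast]
  congr 1
  omega

-- once a start marker occurs, the pass ends in the started state
theorem altGo_false_snd_true (l : List String) : ∀ s,
    l.findIdx? (fun x => aIsStart (altNorm x)) = some s → (altGo l false []).2 = true := by
  induction l with
  | nil => intro s h; simp at h
  | cons a t iht =>
    intro s h
    rw [List.findIdx?_cons] at h
    by_cases ha : aIsStart (altNorm a) = true
    · simp [altGo, ha, altGo_true]
    · simp [ha] at h
      obtain ⟨s', hs', _⟩ := h
      simp [altGo, ha]
      exact iht s' hs'

theorem main_eq (lines : List String) :
    slice_between_markers_py lines = slice_between_markers_py_alt lines := by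
  induction lines with
  | nil => rfl
  | cons ln rest ih =>
    simp only [slice_between_markers_py, slice_between_markers_py_alt]
    simp only [sliceFrom, sliceFromSucc, sliceSeg]
    rw [findIdx?_norm, List.findIdx?_cons]
    by_cases hs : aIsStart (altNorm ln) = true
    · -- start marker at the head: A slices from 0, B collects from here
      rw [hs]
      rw [show (altGo (ln :: rest) false []) =
          ([ln] ++ rest.takeWhile (fun x => !aIsEnd (altNorm x)), true) by
        simp [altGo, hs, altGo_true]]
      simp only [if_true, aNormList_cons, List.drop_succ_cons, List.drop_zero]
      rw [findIdx?_norm]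
      cases hfe : rest.findIdx? (fun x => aIsEnd (altNorm x)) with
      | none => simp [takeWhile_of_findIdx?_none _ _ hfe]
      | some j =>
        simp [takeWhile_of_findIdx?_some _ _ j hfe, List.take_succ_cons, Nat.add_comm 1 j]
    · -- head is not a start marker: both sides defer to the tail
      rw [show (altGo (ln :: rest) false []) = altGo rest false [] by simp [altGo, hs]]
      simp only [Bool.not_eq_true] at hs
      rw [hs]
      simp only [Bool.false_eq_true, if_false]
      cases hf : rest.findIdx? (fun x => aIsStart (altNorm x)) with
      | none =>
        rw [altGo_false_none rest hf []]
        simp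
      | some s =>
        have hA := ih
        rw [slice_between_markers_py] at hA
        simp only [sliceFrom, sliceFromSucc, sliceSeg, findIdx?_norm, hf] at hA
        have hs2 : (altGo rest false []).2 = true := altGo_false_snd_true rest s hf
        have hBrest : slice_between_markers_py_alt rest = (altGo rest false []).1 := by
          simp [slice_between_markers_py_alt, hs2]
        simp only [Option.map_some, aNormList_cons, List.drop_succ_cons, hs2, if_true]
        rw [← hBrest]
        exact hA

-- ===== VERDICT (by name: the statement is the Claim_ definition above) =====
theorem slice_between_markers_py_spec : Claim_equal_slice_between_markers_py := by
  intro lines _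
  unfold Spec_slice_between_markers_py
  exact main_eq lines
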